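-- pv_equiv track=rewrite | github.com/synbioks/Text-Mining-NLP | top-model/huggingface-finetune/data_utils.py | convert
-- ===== SOURCE A (Python) =====
-- def convert(lines, f):
--     tokens_ = []
--     tags_ = []
--
--     data = {"words": [], "ner": []}
--
--     for line in lines:
--         line = line.strip()
--         if len(line) == 0:
--             data["words"].append(tokens_)
--             data["ner"].append(tags_)
--             tokens_ = []
--             tags_ = []
--         else:
--             token, tag = line.split("\t")
--             if len(tag) > 1:
--                 tag = tag.split("-")[0]
--             tokens_.append(token.strip())
--             tags_.append(tag.strip())
--
--     if len(tokens_) > 0: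
--         data["words"].append(tokens_)
--         data["ner"].append(tags_)
--
--     return data
-- ===== SOURCE B (Python) =====
-- def _parse_line(s):
--     token, tag = s.split("\t")
--     if len(tag) > 1:
--         tag = tag.split("-")[0]
--     return token.strip(), tag.strip()
--
--
-- def convert(lines, f):
--     # group stripped lines into segments separated by blank lines
--     # (consecutive blanks give empty segments, as in A)
--     segs = [[]]
--     for line in lines:
--         s = line.strip()
--         if s:
--             segs[-1].append(s)
--         else:
--             segs.append([])
--     # every segment before a blank separator is kept; the trailing one only if non-empty
--     groups = segs[:-1] + ([segs[-1]] if segs[-1] else [])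
--     parsed = [[_parse_line(s) for s in seg] for seg in groups]
--     return {"words": [[w for w, _ in seg] for seg in parsed],
--             "ner": [[t for _, t in seg] for seg in parsed]}
-- ===== Notes on version B (the rewrite author's own statement) =====
-- stated objective: alternative
-- what changed: Replaces the accumulate-and-flush single pass (four parallel accumulators with in-loop flushing and a trailing flush) by a grouping step that first splits the lines into blank-separated segments and then maps a per-line parser over each segment, assembling words/ner by projection.
import Mathlib
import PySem

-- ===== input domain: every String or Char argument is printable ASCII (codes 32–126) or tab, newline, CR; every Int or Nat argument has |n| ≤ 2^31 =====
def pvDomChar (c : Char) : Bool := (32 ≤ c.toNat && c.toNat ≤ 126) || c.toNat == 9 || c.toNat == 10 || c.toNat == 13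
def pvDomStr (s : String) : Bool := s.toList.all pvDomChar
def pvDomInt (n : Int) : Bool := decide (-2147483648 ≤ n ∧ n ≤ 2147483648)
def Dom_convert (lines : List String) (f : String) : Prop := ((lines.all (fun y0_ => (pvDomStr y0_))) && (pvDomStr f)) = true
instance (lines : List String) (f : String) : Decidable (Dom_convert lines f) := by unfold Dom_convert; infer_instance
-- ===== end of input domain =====

-- B regroups: split the lines into blank-separated segments first, then parse each segment;
-- A accumulates tokens/tags and flushes at each blank line (and once at the end if non-empty).

-- ===== PORT A =====
-- single pass, state = ((tokens_, tags_), (data["words"], data["ner"])); the loop body, named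
def pvStepA (st : (List String × List String) × (List (List String) × List (List String)))
    (line : String) : (List String × List String) × (List (List String) × List (List String)) :=
  let s := PySem.Str.strip line
  if PySem.Str.len s = 0 then
    (([], []), (st.2.1 ++ [st.1.1], st.2.2 ++ [st.1.2]))
  else
    match PySem.Str.split? s "\t" with
    | some [token, tag] =>
      let tag := if PySem.Str.len tag > 1 then ((PySem.Str.split? tag "-").getD []).headD "" else tag
      ((st.1.1 ++ [PySem.Str.strip token], st.1.2 ++ [PySem.Str.strip tag]), st.2)
    | _ => st   -- Python raises ValueError here; excluded by Pre_convert

def convert (lines : List String) (f : String) : List (String × List (List String)) :=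
  let st := lines.foldl pvStepA (([], []), ([], []))
  if st.1.1.length > 0 then
    [("words", st.2.1 ++ [st.1.1]), ("ner", st.2.2 ++ [st.1.2])]
  else
    [("words", st.2.1), ("ner", st.2.2)]

-- ===== PORT B =====
-- _parse_line of Source B
def pvParseLine (s : String) : String × String :=
  match PySem.Str.split? s "\t" with
  | some [token, tag] =>
    let tag := if PySem.Str.len tag > 1 then ((PySem.Str.split? tag "-").getD []).headD "" else tag
    (PySem.Str.strip token, PySem.Str.strip tag)
  | _ => ("", "")   -- Python raises ValueError here; excluded by Pre_convert

-- Source B's grouping loop body, named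
def pvStepB (st : List (List String) × List String) (line : String) :
    List (List String) × List String :=
  let s := PySem.Str.strip line
  if PySem.Str.len s = 0 then (st.1 ++ [st.2], []) else (st.1, st.2 ++ [s])

def convert_alt (lines : List String) (f : String) : List (String × List (List String)) :=
  let segs := lines.foldl pvStepB ([], [])
  let groups := segs.1 ++ (if segs.2 ≠ [] then [segs.2] else [])
  let parsed := groups.map (fun seg => seg.map pvParseLine)
  [("words", parsed.map (fun seg => seg.map Prod.fst)),
   ("ner",   parsed.map (fun seg => seg.map Prod.snd))]

-- ===== PRECONDITION & SPEC =====
-- Pre_ excludes exactly the inputs with a non-blank line not containing exactly one tab,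
-- on which A's line.split("\t") raises ValueError (B raises there too).
def Pre_convert (lines : List String) (f : String) : Prop :=
  ∀ l ∈ lines, PySem.Str.strip l = "" ∨
    ((PySem.Str.split? (PySem.Str.strip l) "\t").getD []).length = 2
instance (lines : List String) (f : String) : Decidable (Pre_convert lines f) := by
  unfold Pre_convert; infer_instance

def pvWitness_convert : List String × String := (["a\tB-Gene", "x\tO", "", "b\tO"], "dev")

def Spec_convert (lines : List String) (f : String) (out : List (String × List (List String))) : Prop := out = convert_alt lines f
instance (lines : List String) (f : String) (out : List (String × List (List String))) : Decidable (Spec_convert lines f out) := by unfold Spec_convert; infer_instance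

-- ===== CLAIM (what is proved, stated in full; the proofs are below) =====
def Claim_equal_convert : Prop := ∀ (lines : List String) (f : String), Dom_convert lines f → Pre_convert lines f → Spec_convert lines f (convert lines f)

-- ===== LEMMAS AND PROOFS =====

-- the two loops kept in lock-step: A's state is B's state with every line already parsed
theorem pv_loop_eq (lines : List String)
    (h : ∀ l ∈ lines, PySem.Str.strip l = "" ∨
      ((PySem.Str.split? (PySem.Str.strip l) "\t").getD []).length = 2)
    (done : List (List String)) (cur : List String) :
    lines.foldl pvStepA
      ((cur.map (fun s => (pvParseLine s).1), cur.map (fun s => (pvParseLine s).2)),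
       (done.map (fun seg => seg.map (fun s => (pvParseLine s).1)),
        done.map (fun seg => seg.map (fun s => (pvParseLine s).2))))
    =
    ((((lines.foldl pvStepB (done, cur)).2).map (fun s => (pvParseLine s).1),
      (((lines.foldl pvStepB (done, cur)).2).map (fun s => (pvParseLine s).2))),
     ((((lines.foldl pvStepB (done, cur)).1).map (fun seg => seg.map (fun s => (pvParseLine s).1))),
      (((lines.foldl pvStepB (done, cur)).1).map (fun seg => seg.map (fun s => (pvParseLine s).2))))) := by
  induction lines generalizing done cur with
  | nil => simp
  | cons l ls ih =>
    have hl := h l (by simp)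
    have hrest : ∀ x ∈ ls, PySem.Str.strip x = "" ∨
        ((PySem.Str.split? (PySem.Str.strip x) "\t").getD []).length = 2 :=
      fun x hx => h x (by simp [hx])
    by_cases hb : PySem.Chars.strip l.toList = []
    · rw [List.foldl_cons, List.foldl_cons]
      have hA : pvStepA ((cur.map (fun s => (pvParseLine s).1), cur.map (fun s => (pvParseLine s).2)),
          (done.map (fun seg => seg.map (fun s => (pvParseLine s).1)),
           done.map (fun seg => seg.map (fun s => (pvParseLine s).2)))) l
          = ((([] : List String).map (fun s => (pvParseLine s).1), ([] : List String).map (fun s => (pvParseLine s).2)),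
             ((done ++ [cur]).map (fun seg => seg.map (fun s => (pvParseLine s).1)),
              (done ++ [cur]).map (fun seg => seg.map (fun s => (pvParseLine s).2)))) := by
        simp [pvStepA, hb]
      have hB : pvStepB (done, cur) l = (done ++ [cur], []) := by
        simp [pvStepB, hb]
      rw [hA, hB, ih hrest]
    · rcases hl with hl | hl
      · exact absurd (by simp [← PySem.Str.toList_strip, hl]) hb
      · obtain ⟨parts, hsome⟩ : ∃ parts, PySem.Str.split? (PySem.Str.strip l) "\t" = some parts := by
          cases hps : PySem.Str.split? (PySem.Str.strip l) "\t" with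
          | none => simp [hps] at hl
          | some ps => exact ⟨ps, rfl⟩
        obtain ⟨a, b, hab⟩ : ∃ a b, parts = [a, b] := by
          rw [hsome] at hl
          match parts, hl with
          | [a, b], _ => exact ⟨a, b, rfl⟩
        subst hab
        rw [List.foldl_cons, List.foldl_cons]
        have hA : pvStepA ((cur.map (fun s => (pvParseLine s).1), cur.map (fun s => (pvParseLine s).2)),
            (done.map (fun seg => seg.map (fun s => (pvParseLine s).1)),
             done.map (fun seg => seg.map (fun s => (pvParseLine s).2)))) l
            = (((cur ++ [PySem.Str.strip l]).map (fun s => (pvParseLine s).1),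
                (cur ++ [PySem.Str.strip l]).map (fun s => (pvParseLine s).2)),
               (done.map (fun seg => seg.map (fun s => (pvParseLine s).1)),
                done.map (fun seg => seg.map (fun s => (pvParseLine s).2)))) := by
          simp [pvStepA, hb, hsome, pvParseLine]
        have hB : pvStepB (done, cur) l = (done, cur ++ [PySem.Str.strip l]) := by
          simp [pvStepB, hb]
        rw [hA, hB, ih hrest]

theorem convert_eq_alt (lines : List String) (f : String)
    (hpre : Pre_convert lines f) : convert lines f = convert_alt lines f := by
  unfold convert convert_alt
  have hmain := pv_loop_eq lines hpre [] []
  simp only [List.map_nil] at hmain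
  rw [hmain]
  set st := lines.foldl pvStepB ([], []) with hst
  by_cases hc : st.2 = []
  · simp [hc, List.map_map, Function.comp_def]
  · simp [hc, List.length_pos_iff, List.map_map, Function.comp_def]

-- ===== VERDICT (by name: the statement is the Claim_ definition above) =====
theorem convert_spec : Claim_equal_convert := by
  intro lines f _ hpre
  exact convert_eq_alt lines f hpre
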